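-- pv_equiv track=rewrite | github.com/jusram624/Algorithms | ElementarySortCh2/binarySearch.py | greatestLess
-- ===== SOURCE A (Python) =====
-- def greatestLess(arr, target):
--     low = 0
--     high = len(arr) - 1
--     ans = -1
--
--     while low <= high:
--         mid = (low + high) //2
--         if target < arr[mid]:
--             high = mid -1
--         elif target > arr[mid]:
--             ans = mid
--             low = mid +1
--         else:
--             high = mid - 1
--     return ans
-- ===== SOURCE B (Python) =====
-- def greatestLess(arr, target):
--     # Size-based divide and conquer: a subproblem is (lo, n) = start index and
--     # element count (instead of A's low/high bounds with an 'ans' register).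
--     # Returns None for an empty range; a right-half miss falls back to mid.
--     def rec(lo, n):
--         if n == 0:
--             return None
--         k = (n - 1) // 2
--         mid = lo + k
--         if target > arr[mid]:
--             r = rec(mid + 1, n - 1 - k)
--             return mid if r is None else r
--         return rec(lo, k)
--     r = rec(0, len(arr))
--     return -1 if r is None else r
-- ===== Notes on version B (the rewrite author's own statement) =====
-- stated objective: alternative
-- what changed: A's imperative while loop over Int bounds (low, high) with a mutable 'ans' register is replaced by a size-based divide-and-conquer recursion over (start index, element count) in Nat, returning an Option combined on the way back out (None for an empty range, right-half miss falls back to mid).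
import Mathlib
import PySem

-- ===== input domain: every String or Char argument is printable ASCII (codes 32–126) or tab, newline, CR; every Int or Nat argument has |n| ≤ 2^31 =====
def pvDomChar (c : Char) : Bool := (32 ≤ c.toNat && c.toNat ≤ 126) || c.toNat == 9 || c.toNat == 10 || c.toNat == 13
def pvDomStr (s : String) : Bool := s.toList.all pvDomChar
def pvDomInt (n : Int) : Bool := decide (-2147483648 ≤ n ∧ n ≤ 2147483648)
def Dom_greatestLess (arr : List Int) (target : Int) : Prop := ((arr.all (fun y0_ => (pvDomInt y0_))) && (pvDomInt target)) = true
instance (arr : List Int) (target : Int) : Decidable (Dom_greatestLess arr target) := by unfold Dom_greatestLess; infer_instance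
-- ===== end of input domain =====

-- B replaces A's while loop over Int bounds (low, high) with a mutable 'ans'
-- register by a size-based divide-and-conquer recursion over (start, count) in
-- Nat returning an Option combined on the way back (objective: alternative).


-- ===== PORT A =====
-- A's while loop: state (low, high, ans); arr[mid] is always in range on
-- reachable states (0 ≤ low ≤ mid ≤ high ≤ len-1), so the .getD 0 default is
-- never used there; branch order mirrors the Python.
def greatestLessLoop (arr : List Int) (target : Int) (low high ans : Int) : Int :=
  if _h : low ≤ high then
    let mid := PySem.Int.floordiv (low + high) 2
    let v := (PySem.List.pyGet? arr mid).getD 0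
    if target < v then greatestLessLoop arr target low (mid - 1) ans
    else if target > v then greatestLessLoop arr target (mid + 1) high mid
    else greatestLessLoop arr target low (mid - 1) ans
  else ans
termination_by (high + 1 - low).toNat
decreasing_by
  all_goals
    have := PySem.Int.floordiv_two_mid_bounds (lo := low) (hi := high) (by omega)
    omega

def greatestLess (arr : List Int) (target : Int) : Int :=
  greatestLessLoop arr target 0 ((arr.length : Int) - 1) (-1)

-- ===== PORT B =====
-- B's rec(lo, n): Nat start index and element count; none on an empty range;
-- a right-half miss falls back to mid.  arr[mid] is always in range
-- (lo + n ≤ len on reachable states), so getD's default is never used there.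
def glRec (arr : List Int) (target : Int) (lo : Nat) (n : Nat) : Option Nat :=
  if n = 0 then none
  else
    let k := (n - 1) / 2
    let mid := lo + k
    if target > arr.getD mid 0 then
      match glRec arr target (mid + 1) (n - 1 - k) with
      | none => some mid
      | some r => some r
    else glRec arr target lo k
termination_by n
decreasing_by all_goals omega

def greatestLess_alt (arr : List Int) (target : Int) : Int :=
  match glRec arr target 0 arr.length with
  | none => -1
  | some i => (i : Int)

-- ===== PRECONDITION & SPEC =====
def Spec_greatestLess (arr : List Int) (target : Int) (out : Int) : Prop := out = greatestLess_alt arr target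
instance (arr : List Int) (target : Int) (out : Int) : Decidable (Spec_greatestLess arr target out) := by unfold Spec_greatestLess; infer_instance

-- ===== CLAIM =====
def Claim_equal_greatestLess : Prop := ∀ (arr : List Int) (target : Int), Dom_greatestLess arr target → Spec_greatestLess arr target (greatestLess arr target)

-- ===== LEMMAS AND PROOFS =====

-- The element both programs probe is the same.
theorem probe_eq (arr : List Int) (i : Nat) :
    (PySem.List.pyGet? arr (i : Int)).getD 0 = arr.getD i 0 := by
  simp [PySem.List.pyGet?_natCast, List.getD]

-- Loop on interval [lo, lo+n-1] = recursion on (lo, n), with the loop's result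
-- being the recursion's result, or the incoming 'ans' when that is none.
theorem loop_eq_rec (arr : List Int) (target : Int) (lo n : Nat) (ans : Int) :
    greatestLessLoop arr target (lo : Int) ((lo : Int) + (n : Int) - 1) ans =
      (match glRec arr target lo n with
       | none => ans
       | some i => (i : Int)) := by
  rw [greatestLessLoop, glRec]
  by_cases h0 : n = 0
  · simp [h0]
  · have hn : 1 ≤ n := Nat.one_le_iff_ne_zero.mpr h0
    have hle : (lo : Int) ≤ (lo : Int) + (n : Int) - 1 := by omega
    simp only [dif_pos hle, if_neg h0]
    have hk : (n - 1) / 2 ≤ n - 1 := Nat.div_le_self _ _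
    have hmid : PySem.Int.floordiv ((lo : Int) + ((lo : Int) + (n : Int) - 1)) 2
        = ((lo + (n - 1) / 2 : Nat) : Int) := by
      rw [PySem.Int.floordiv_eq_ediv_of_pos (by omega)]
      have h2 : ((n - 1) / 2 : Nat) = ((n : Int) - 1) / 2 := by omega
      push_cast [h2]
      omega
    rw [hmid, probe_eq]
    set k := (n - 1) / 2 with hkdef
    set v := arr.getD (lo + k) 0 with hv
    by_cases h1 : target < v
    · simp only [if_pos h1, if_neg (by omega : ¬ target > v)]
      have : ((lo + k : Nat) : Int) - 1 = (lo : Int) + (k : Int) - 1 := by push_cast; ring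
      rw [this, loop_eq_rec arr target lo k ans]
    · by_cases h2 : target > v
      · simp only [if_neg h1, if_pos h2]
        have : ((lo + k : Nat) : Int) + 1 = ((lo + k + 1 : Nat) : Int) := by push_cast; ring
        rw [this]
        have harg : (lo : Int) + (n : Int) - 1
            = ((lo + k + 1 : Nat) : Int) + ((n - 1 - k : Nat) : Int) - 1 := by
          push_cast [Nat.sub_sub]
          omega
        rw [harg, loop_eq_rec arr target (lo + k + 1) (n - 1 - k) ((lo + k : Nat) : Int)]
        cases glRec arr target (lo + k + 1) (n - 1 - k) <;> simp
      · simp only [if_neg h1, if_neg h2]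
        have : ((lo + k : Nat) : Int) - 1 = (lo : Int) + (k : Int) - 1 := by push_cast; ring
        rw [this, loop_eq_rec arr target lo k ans]
termination_by n
decreasing_by all_goals omega

-- ===== VERDICT =====
theorem greatestLess_spec : Claim_equal_greatestLess := by
  intro arr target _
  unfold Spec_greatestLess greatestLess greatestLess_alt
  have h := loop_eq_rec arr target 0 arr.length (-1)
  simpa using h
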